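-- pv_equiv track=rewrite | github.com/praveenpke/confluence-bot | src/format_response.py | format_grid_columns
-- ===== SOURCE A (Python) =====
-- def format_grid_columns(text: str) -> str:
--     """
--     Special formatter for grid columns data
--     """
--     if not text or 'grid' not in text.lower() or 'column' not in text.lower():
--         return text
--
--     # Extract column information
--     lines = text.split('\n')
--     formatted_sections = []
--
--     current_section = None
--     current_items = []
--
--     for line in lines:
--         line = line.strip()
--         if not line:
--             continue
--
--         # Check for section headers
--         if any(keyword in line.lower() for keyword in ['recent columns', 'visible columns', 'active columns', 'group']):
--             # Save previous section
--             if current_section and current_items: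
--                 formatted_sections.append(f"## {current_section}\n" + '\n'.join(current_items))
--
--             current_section = line
--             current_items = []
--             continue
--
--         # Check for column definitions
--         if '(' in line and ')' in line and any(keyword in line.lower() for keyword in ['index', 'field', 'type']):
--             # Extract column name and details
--             parts = line.split('(', 1)
--             if len(parts) == 2:
--                 column_name = parts[0].strip().strip('*').strip()
--                 details = parts[1].rstrip(')').strip()
--
--                 # Format the details
--                 detail_parts = details.split(',')
--                 formatted_details = []
--                 for detail in detail_parts:
--                     detail = detail.strip()
--                     if ':' in detail:
--                         key, value = detail.split(':', 1)
--                         formatted_details.append(f"**{key.strip()}**: {value.strip()}")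
--                     else:
--                         formatted_details.append(detail)
--
--                 formatted_item = f"**{column_name}** ({', '.join(formatted_details)})"
--                 current_items.append(formatted_item)
--                 continue
--
--         # Regular content
--         current_items.append(line)
--
--     # Add final section
--     if current_section and current_items:
--         formatted_sections.append(f"## {current_section}\n" + '\n'.join(current_items))
--
--     if formatted_sections:
--         return '\n\n'.join(formatted_sections)
--
--     return text
-- ===== SOURCE B (Python) =====
-- HEADER_KEYWORDS = ('recent columns', 'visible columns', 'active columns', 'group')
-- DETAIL_KEYWORDS = ('index', 'field', 'type')
--
--
-- def _is_header(line):
--     low = line.lower()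
--     return any(k in low for k in HEADER_KEYWORDS)
--
--
-- def _fmt_detail(detail):
--     detail = detail.strip()
--     if ':' in detail:
--         key, value = detail.split(':', 1)
--         return f"**{key.strip()}**: {value.strip()}"
--     return detail
--
--
-- def _fmt_line(line):
--     low = line.lower()
--     if '(' in line and ')' in line and any(k in low for k in DETAIL_KEYWORDS):
--         parts = line.split('(', 1)
--         if len(parts) == 2:
--             name = parts[0].strip().strip('*').strip()
--             details = parts[1].rstrip(')').strip()
--             body = ', '.join(map(_fmt_detail, details.split(',')))
--             return f"**{name}** ({body})"
--     return line
--
--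
-- def format_grid_columns(text: str) -> str:
--     low = text.lower()
--     if not text or 'grid' not in low or 'column' not in low:
--         return text
--
--     # Stage 1: the stripped, non-blank lines.
--     lines = [s for s in (l.strip() for l in text.split('\n')) if s]
--
--     # Stage 2: advance to the first header line (anything before it is dropped).
--     n = len(lines)
--     i = 0
--     while i < n and not _is_header(lines[i]):
--         i += 1
--
--     # Stage 3: split the remainder into spans [i, j) delimited by header positions,
--     # rendering each span whose body slice is non-empty.
--     sections = []
--     while i < n:
--         j = i + 1
--         while j < n and not _is_header(lines[j]):
--             j += 1
--         body = lines[i + 1:j]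
--         if body:
--             sections.append('## ' + lines[i] + '\n' + '\n'.join(_fmt_line(b) for b in body))
--         i = j
--
--     return '\n\n'.join(sections) if sections else text
-- ===== Notes on version B (the rewrite author's own statement) =====
-- stated objective: alternative
-- what changed: A's single stateful pass with a running (current_section, current_items) accumulator and duplicated flush code is replaced by staged span-splitting: first materialise the stripped non-blank lines, then advance an index to the first header and repeatedly locate the next header position, taking each section's body as the slice between consecutive header positions and rendering it; no section state machine or flush remains.
import Mathlib
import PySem

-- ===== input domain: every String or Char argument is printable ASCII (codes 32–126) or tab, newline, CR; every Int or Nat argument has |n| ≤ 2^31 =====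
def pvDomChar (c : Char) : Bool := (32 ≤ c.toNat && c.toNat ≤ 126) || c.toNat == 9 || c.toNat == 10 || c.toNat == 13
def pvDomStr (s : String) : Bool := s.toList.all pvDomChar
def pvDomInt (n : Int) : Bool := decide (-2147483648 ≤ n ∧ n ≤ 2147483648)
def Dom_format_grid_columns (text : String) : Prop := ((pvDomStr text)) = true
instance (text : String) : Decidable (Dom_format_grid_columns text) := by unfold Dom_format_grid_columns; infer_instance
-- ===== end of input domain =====

-- B replaces A's single stateful pass (running section accumulator + duplicated flush) by staged
-- span-splitting over the pre-cleaned line list; objective: alternative decomposition, same cost.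

-- shared primitive: s.rstrip(chars) — Python's right-strip of the given characters (exact by definition)
def pvRstripChars (s : List Char) (chars : List Char) : List Char :=
  (s.reverse.dropWhile (fun c => chars.contains c)).reverse

-- shared guard expressions (both Pythons write these identical tests)
def pvNotGrid (text : String) : Bool :=
  decide (text.toList = []) || !PySem.Chars.isIn "grid".toList (PySem.Chars.lower text.toList)
    || !PySem.Chars.isIn "column".toList (PySem.Chars.lower text.toList)

def pvHasHeaderKw (l : List Char) : Bool :=
  ["recent columns", "visible columns", "active columns", "group"].any
    (fun k => PySem.Chars.isIn k.toList (PySem.Chars.lower l))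

def pvHasDetailKw (l : List Char) : Bool :=
  ["index", "field", "type"].any (fun k => PySem.Chars.isIn k.toList (PySem.Chars.lower l))

-- ===== PORT A =====
-- A's loop body on a non-blank, already-stripped line, over state
-- (current_section, current_items, formatted_sections).
def pvBodyA (st : Option (List Char) × List (List Char) × List (List Char)) (line : List Char) :
    Option (List Char) × List (List Char) × List (List Char) :=
  if pvHasHeaderKw line then
    let sections :=
      match st.1 with
      | some s => if st.2.1 ≠ [] then
          st.2.2 ++ ["## ".toList ++ s ++ ['\n'] ++ PySem.Chars.join ['\n'] st.2.1]
        else st.2.2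
      | none => st.2.2
    (some line, [], sections)
  else if PySem.Chars.isIn ['('] line && PySem.Chars.isIn [')'] line && pvHasDetailKw line then
    match PySem.Chars.splitOnMax line ['('] 1 with
    | [p0, p1] =>
      let columnName := PySem.Chars.strip (PySem.Chars.stripChars (PySem.Chars.strip p0) ['*'])
      let details := PySem.Chars.strip (pvRstripChars p1 [')'])
      let formattedDetails := (PySem.Chars.splitOn details [',']).foldl
        (fun acc detail =>
          acc ++ [let d := PySem.Chars.strip detail
                  if PySem.Chars.isIn [':'] d then
                    match PySem.Chars.splitOnMax d [':'] 1 with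
                    | [key, value] =>
                        "**".toList ++ PySem.Chars.strip key ++ "**: ".toList ++ PySem.Chars.strip value
                    | _ => d   -- unreachable: ':' in d gives exactly two parts
                  else d]) []
      (st.1, st.2.1 ++
        ["**".toList ++ columnName ++ "** (".toList ++ PySem.Chars.join ", ".toList formattedDetails ++ [')']],
       st.2.2)
    | _ => (st.1, st.2.1 ++ [line], st.2.2)   -- unreachable: '(' in line gives exactly two parts
  else (st.1, st.2.1 ++ [line], st.2.2)

-- A's full loop body: strip the raw line and skip it if blank
def pvStepA (st : Option (List Char) × List (List Char) × List (List Char)) (raw : List Char) :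
    Option (List Char) × List (List Char) × List (List Char) :=
  let line := PySem.Chars.strip raw
  if line = [] then st else pvBodyA st line

-- A's trailing '# Add final section' flush
def pvFlushA (st : Option (List Char) × List (List Char) × List (List Char)) : List (List Char) :=
  match st.1 with
  | some s => if st.2.1 ≠ [] then
      st.2.2 ++ ["## ".toList ++ s ++ ['\n'] ++ PySem.Chars.join ['\n'] st.2.1]
    else st.2.2
  | none => st.2.2

def format_grid_columns (text : String) : String :=
  if pvNotGrid text then text
  else
    let sections := pvFlushA ((PySem.Chars.splitOn text.toList ['\n']).foldl pvStepA (none, [], []))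
    if sections ≠ [] then String.ofList (PySem.Chars.join "\n\n".toList sections) else text

-- ===== PORT B =====
-- B's _fmt_detail
def pvFmtDetail (detail : List Char) : List Char :=
  let d := PySem.Chars.strip detail
  if PySem.Chars.isIn [':'] d then
    match PySem.Chars.splitOnMax d [':'] 1 with
    | [key, value] =>
        "**".toList ++ PySem.Chars.strip key ++ "**: ".toList ++ PySem.Chars.strip value
    | _ => d   -- unreachable: ':' in d gives exactly two parts
  else d

-- B's _fmt_line
def pvFmtLine (line : List Char) : List Char :=
  if PySem.Chars.isIn ['('] line && PySem.Chars.isIn [')'] line && pvHasDetailKw line then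
    match PySem.Chars.splitOnMax line ['('] 1 with
    | [p0, p1] =>
      let name := PySem.Chars.strip (PySem.Chars.stripChars (PySem.Chars.strip p0) ['*'])
      let details := PySem.Chars.strip (pvRstripChars p1 [')'])
      "**".toList ++ name ++ "** (".toList
        ++ PySem.Chars.join ", ".toList ((PySem.Chars.splitOn details [',']).map pvFmtDetail) ++ [')']
    | _ => line
  else line

-- B's stage 3 span loop, ported as structural recursion: the loop 'j := first header
-- position ≥ i+1; body := lines[i+1:j]; i := j' is exactly, for the tail starting at the
-- current header, body = takeWhile (not header) of the rest and the next span starts at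
-- dropWhile (not header) of the rest.
def pvSectionsB : List (List Char) → List (List Char)
  | [] => []
  | h :: rest =>
    let body := rest.takeWhile (fun l => !pvHasHeaderKw l)
    let tail := pvSectionsB (rest.dropWhile (fun l => !pvHasHeaderKw l))
    if body ≠ [] then
      ("## ".toList ++ h ++ ['\n'] ++ PySem.Chars.join ['\n'] (body.map pvFmtLine)) :: tail
    else tail
termination_by ls => ls.length
decreasing_by
  simp only [List.length_cons]
  exact Nat.lt_succ_of_le (List.length_dropWhile_le _ _)

def format_grid_columns_alt (text : String) : String :=
  if pvNotGrid text then text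
  else
    -- stage 1: stripped non-blank lines; stage 2: drop to the first header; stage 3: spans
    let lines := ((PySem.Chars.splitOn text.toList ['\n']).map PySem.Chars.strip).filter (· ≠ [])
    let sections := pvSectionsB (lines.dropWhile (fun l => !pvHasHeaderKw l))
    if sections ≠ [] then String.ofList (PySem.Chars.join "\n\n".toList sections) else text

-- ===== PRECONDITION & SPEC =====
def Spec_format_grid_columns (text : String) (out : String) : Prop := out = format_grid_columns_alt text
instance (text : String) (out : String) : Decidable (Spec_format_grid_columns text out) := by unfold Spec_format_grid_columns; infer_instance

-- ===== CLAIM (what is proved, stated in full; the proofs are below) =====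
def Claim_equal_format_grid_columns : Prop := ∀ (text : String), Dom_format_grid_columns text → Spec_format_grid_columns text (format_grid_columns text)

-- ===== LEMMAS AND PROOFS =====

def pvRender (h : List Char) (body : List (List Char)) : List Char :=
  "## ".toList ++ h ++ ['\n'] ++ PySem.Chars.join ['\n'] (body.map pvFmtLine)

-- A's fold over the raw split lines is a fold of the blank-free body over the cleaned lines
theorem pvFold_clean (raws : List (List Char)) :
    ∀ st, raws.foldl pvStepA st = ((raws.map PySem.Chars.strip).filter (· ≠ [])).foldl pvBodyA st := by
  induction raws with
  | nil => intro st; rfl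
  | cons r rs ih =>
    intro st
    by_cases hb : PySem.Chars.strip r = [] <;>
      simp [pvStepA, hb, ih]

-- A's non-header branch appends exactly pvFmtLine of the line
theorem pvBodyA_eq (st : Option (List Char) × List (List Char) × List (List Char)) (line : List Char) :
    pvBodyA st line =
      (if pvHasHeaderKw line then
         (some line, [],
          match st.1 with
          | some s => if st.2.1 ≠ [] then
              st.2.2 ++ ["## ".toList ++ s ++ ['\n'] ++ PySem.Chars.join ['\n'] st.2.1]
            else st.2.2
          | none => st.2.2)
       else (st.1, st.2.1 ++ [pvFmtLine line], st.2.2)) := by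
  unfold pvBodyA pvFmtLine
  simp only [PySem.List.foldl_append_singleton_eq_map, List.nil_append]
  split
  · rfl
  · split
    · split
      · rfl
      · rfl
    · simp_all

-- the fold from a live section (some h) with accumulated body 'acc' renders the spans
theorem pvFoldSome (ls : List (List Char)) :
    ∀ (h : List Char) (acc : List (List Char)) (secs : List (List Char)),
    pvFlushA (ls.foldl pvBodyA (some h, acc.map pvFmtLine, secs)) =
      secs ++
        (if acc ++ ls.takeWhile (fun l => !pvHasHeaderKw l) ≠ [] then
           pvRender h (acc ++ ls.takeWhile (fun l => !pvHasHeaderKw l)) ::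
             pvSectionsB (ls.dropWhile (fun l => !pvHasHeaderKw l))
         else pvSectionsB (ls.dropWhile (fun l => !pvHasHeaderKw l))) := by
  induction ls with
  | nil =>
    intro h acc secs
    by_cases ha : acc = [] <;>
      simp [pvFlushA, pvSectionsB, pvRender, ha]
  | cons x rest ih =>
    intro h acc secs
    rw [List.foldl_cons, pvBodyA_eq]
    by_cases hx : pvHasHeaderKw x = true
    · -- x opens a new section: flush (h, acc) if acc nonempty
      simp only [hx, if_true]
      have := ih x [] (secs ++ if acc.map pvFmtLine ≠ [] then [pvRender h acc] else [])
      simp only [List.map_nil, List.nil_append] at this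
      rw [show ((some x, ([] : List (List Char)),
            match some h with
            | some s => if acc.map pvFmtLine ≠ [] then
                secs ++ ["## ".toList ++ s ++ ['\n'] ++ PySem.Chars.join ['\n'] (acc.map pvFmtLine)]
              else secs
            | none => secs) : Option (List Char) × List (List Char) × List (List Char)) =
          (some x, [], secs ++ if acc.map pvFmtLine ≠ [] then [pvRender h acc] else []) from by
        by_cases ha : acc = [] <;> simp [pvRender, ha]]
      rw [this]
      by_cases ha : acc = [] <;>
        simp [hx, pvSectionsB, pvRender, ha, List.append_assoc]
    · -- x is a body line: it joins the accumulator
      simp only [hx, if_false, Bool.false_eq_true]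
      have := ih h (acc ++ [x]) secs
      simp only [List.map_append, List.map_cons, List.map_nil] at this
      rw [show (acc.map pvFmtLine ++ [pvFmtLine x]) = acc.map pvFmtLine ++ ([pvFmtLine x] ++ []) from by simp] at this
      simp only [List.append_nil] at this
      rw [this]
      simp [hx]
  
-- the fold from the initial (none) state: everything before the first header is discarded
theorem pvFoldNone (ls : List (List Char)) :
    ∀ (items : List (List Char)),
    pvFlushA (ls.foldl pvBodyA (none, items, [])) =
      pvSectionsB (ls.dropWhile (fun l => !pvHasHeaderKw l)) := by
  induction ls with
  | nil => intro items; simp [pvFlushA, pvSectionsB]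
  | cons x rest ih =>
    intro items
    rw [List.foldl_cons, pvBodyA_eq]
    by_cases hx : pvHasHeaderKw x = true
    · simp only [hx, if_true]
      have := pvFoldSome rest x [] []
      simp only [List.map_nil, List.nil_append] at this
      rw [this]
      simp [hx, pvSectionsB, pvRender]
    · simp only [hx, if_false, Bool.false_eq_true]
      rw [ih]
      simp [hx]

-- ===== VERDICT (by name: the statement is the Claim_ definition above) =====
theorem format_grid_columns_spec : Claim_equal_format_grid_columns := by
  intro text _
  show format_grid_columns text = format_grid_columns_alt text
  unfold format_grid_columns format_grid_columns_alt
  by_cases hg : pvNotGrid text = true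
  · simp [hg]
  · simp only [hg, Bool.false_eq_true, if_false]
    rw [pvFold_clean, pvFoldNone]
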